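-- pv_equiv track=rewrite | github.com/jaiwanthi2004/Workflow-Enginee | backend/app/engine/rule_engine.py | _split_logical
-- ===== SOURCE A (Python) =====
-- def _split_logical(expr: str, op: str) -> list:
--     """Split expression by logical operator, respecting parentheses and quotes."""
--     parts = []
--     depth = 0
--     in_string = None
--     current = ""
--     i = 0
--
--     while i < len(expr):
--         ch = expr[i]
--
--         if ch in ('"', "'") and (i == 0 or expr[i - 1] != "\\"):
--             if in_string is None:
--                 in_string = ch
--             elif in_string == ch:
--                 in_string = None
--
--         if in_string is None:
--             if ch == "(":
--                 depth += 1
--             elif ch == ")":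
--                 depth -= 1
--
--         if depth == 0 and in_string is None and expr[i : i + len(op)] == op:
--             parts.append(current.strip())
--             current = ""
--             i += len(op)
--             continue
--
--         current += ch
--         i += 1
--
--     if current.strip():
--         parts.append(current.strip())
--
--     return parts
-- ===== SOURCE B (Python) =====
-- def _split_logical(expr: str, op: str) -> list:
--     """Split expression by logical operator, respecting parentheses and quotes.
--
--     Re-implementation: a find-next-split-point helper plus an outer loop that
--     slices the segments out of expr (no character-by-character accumulator).
--     """
--
--     def find(i, depth, in_string):
--         # index of the next top-level occurrence of op at or after i, else None
--         while i < len(expr):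
--             ch = expr[i]
--             if ch in ('"', "'") and (i == 0 or expr[i - 1] != "\\"):
--                 if in_string is None:
--                     in_string = ch
--                 elif in_string == ch:
--                     in_string = None
--             if in_string is None:
--                 if ch == "(":
--                     depth += 1
--                 elif ch == ")":
--                     depth -= 1
--             if depth == 0 and in_string is None and expr.startswith(op, i):
--                 return i
--             i += 1
--         return None
--
--     parts = []
--     j = 0
--     while True:
--         k = find(j, 0, None)
--         if k is None:
--             tail = expr[j:].strip()
--             if tail:
--                 parts.append(tail)
--             return parts
--         parts.append(expr[j:k].strip())
--         j = k + len(op)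
-- ===== Notes on version B (the rewrite author's own statement) =====
-- stated objective: faster
-- what changed: Replaced the single accumulate-into-current loop by a find-next-top-level-occurrence helper plus an outer loop that slices each segment directly out of expr, removing the per-character string accumulation (current += ch), which is quadratic in CPython when segments are large.
-- outside the precondition, e.g. on _split_logical('"a', ''): A returns ['"a'], B returns ['"a']
import Mathlib
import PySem

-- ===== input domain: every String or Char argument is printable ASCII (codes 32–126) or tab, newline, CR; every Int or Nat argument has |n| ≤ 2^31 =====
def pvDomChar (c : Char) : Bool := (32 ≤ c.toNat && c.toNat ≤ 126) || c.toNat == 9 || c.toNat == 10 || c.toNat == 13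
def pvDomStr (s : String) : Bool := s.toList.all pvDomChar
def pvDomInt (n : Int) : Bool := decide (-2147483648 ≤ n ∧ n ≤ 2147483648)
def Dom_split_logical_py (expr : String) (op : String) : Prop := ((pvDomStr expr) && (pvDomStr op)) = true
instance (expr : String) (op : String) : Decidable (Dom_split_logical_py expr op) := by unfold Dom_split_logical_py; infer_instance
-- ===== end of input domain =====

-- B rewrites A as a find-next-split-point helper plus an outer loop slicing the segments out of expr
-- (no per-character accumulator); measured faster on large inputs in a timing run.

-- ===== PORT A =====
-- per-character state update (quote toggle with the expr[i-1] escape check, then parens);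
-- this body is textually identical in A's loop and in B's find helper, so it is shared
def pvUpdA (cs : List Char) (i : Nat) (d : Int) (s : Option Char) : Int × Option Char :=
  let ch := cs.getD i ' '
  let s1 := if (ch = '"' ∨ ch = '\'') ∧ (i = 0 ∨ cs.getD (i - 1) ' ' ≠ '\\') then
              (if s = none then some ch else if s = some ch then none else s)
            else s
  let d1 := if s1 = none then (if ch = '(' then d + 1 else if ch = ')' then d - 1 else d) else d
  (d1, s1)

-- A's while loop, step for step; fuel only makes the recursion structural (each position is
-- visited at most twice, so 2*(cs.length+1) fuel is never exhausted when A's Python terminates;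
-- for op = "" — excluded by Pre_ — the Python may loop forever, and then the fuel runs out).
def pvALoop (cs op : List Char) : Nat → Nat → Int → Option Char → List Char → List String → List String
  | 0, _, _, _, _, parts => parts
  | fuel + 1, i, d, s, current, parts =>
    if i < cs.length then
      let ds := pvUpdA cs i d s
      -- expr[i : i+len(op)] == op
      if ds.1 = 0 ∧ ds.2 = none ∧ (cs.drop i).take op.length = op then
        pvALoop cs op fuel (i + op.length) ds.1 ds.2 [] (parts ++ [String.ofList (PySem.Chars.strip current)])
      else
        pvALoop cs op fuel (i + 1) ds.1 ds.2 (current ++ [cs.getD i ' ']) parts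
    else
      if PySem.Chars.strip current ≠ [] then parts ++ [String.ofList (PySem.Chars.strip current)] else parts

def split_logical_py (expr : String) (op : String) : List String :=
  pvALoop expr.toList op.toList (2 * (expr.toList.length + 1)) 0 0 none [] []

-- ===== PORT B =====
-- B's `find`: index of the next top-level occurrence of op at or after i, else none
-- (expr.startswith(op, i) ported as the take/compare on the drop; fuel cs.length+1-i is always enough)
def pvFindOp (cs op : List Char) : Nat → Nat → Int → Option Char → Option Nat
  | 0, _, _, _ => none
  | fuel + 1, i, d, s =>
    if i < cs.length then
      let ds := pvUpdA cs i d s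
      if ds.1 = 0 ∧ ds.2 = none ∧ (cs.drop i).take op.length = op then some i
      else pvFindOp cs op fuel (i + 1) ds.1 ds.2
    else none

-- B's outer while-True loop: slice out each segment; expr[j:k] = (drop j).take (k-j) (exact: 0 ≤ j ≤ k)
-- fuel 2*(cs.length+1) is enough whenever B's Python terminates (each round advances j when op ≠ "",
-- and op = "" — excluded by Pre_ — can stall only where the Python loops forever too).
def pvBGo (cs op : List Char) : Nat → Nat → List String → List String
  | 0, _, parts => parts
  | fuel + 1, j, parts =>
    match pvFindOp cs op (cs.length + 1) j 0 none with
    | some k =>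
        pvBGo cs op fuel (k + op.length)
          (parts ++ [String.ofList (PySem.Chars.strip ((cs.drop j).take (k - j)))])
    | none =>
        if PySem.Chars.strip (cs.drop j) ≠ [] then
          parts ++ [String.ofList (PySem.Chars.strip (cs.drop j))]
        else parts

def split_logical_py_alt (expr : String) (op : String) : List String :=
  pvBGo expr.toList op.toList (2 * (expr.toList.length + 1)) 0 []

-- ===== PRECONDITION & SPEC =====
-- Pre_ excludes op = "": there the empty operator matches at every top-level position and A's
-- `i += len(op)` no longer advances, so A (and B) loop forever on most inputs; on the remaining
-- degenerate inputs (no such position is ever reached at a stable state) both agree anyway.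
def Pre_split_logical_py (expr : String) (op : String) : Prop := op ≠ ""
instance (expr : String) (op : String) : Decidable (Pre_split_logical_py expr op) := by
  unfold Pre_split_logical_py; infer_instance

def pvWitness_split_logical_py : String × String := ("a and (b or c)", " and ")

def Spec_split_logical_py (expr : String) (op : String) (out : List String) : Prop := out = split_logical_py_alt expr op
instance (expr : String) (op : String) (out : List String) : Decidable (Spec_split_logical_py expr op out) := by unfold Spec_split_logical_py; infer_instance

-- ===== CLAIM (what is proved, stated in full; the proofs are below) =====
def Claim_equal_split_logical_py : Prop := ∀ (expr : String) (op : String), Dom_split_logical_py expr op → Pre_split_logical_py expr op → Spec_split_logical_py expr op (split_logical_py expr op)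

-- ===== LEMMAS AND PROOFS =====

-- findOp ignores the exact fuel once it is adequate
theorem pvFindOp_irrel (cs op : List Char) :
    ∀ f1 f2 i d s, cs.length - i < f1 → cs.length - i < f2 →
      pvFindOp cs op f1 i d s = pvFindOp cs op f2 i d s := by
  intro f1
  induction f1 with
  | zero => intro f2 i d s h1 _; omega
  | succ f1 ih =>
    intro f2 i d s h1 h2
    cases f2 with
    | zero => omega
    | succ f2 =>
      simp only [pvFindOp]
      by_cases hi : i < cs.length
      · simp only [hi, if_true]
        split
        · rfl
        · exact ih f2 (i + 1) _ _ (by omega) (by omega)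
      · simp [hi]

theorem pvFindOp_ge (cs op : List Char) :
    ∀ f i d s k, pvFindOp cs op f i d s = some k → i ≤ k := by
  intro f
  induction f with
  | zero => intro i d s k h; simp [pvFindOp] at h
  | succ f ih =>
    intro i d s k h
    simp only [pvFindOp] at h
    by_cases hi : i < cs.length
    · simp only [hi, if_true] at h
      split at h
      · cases h; omega
      · have := ih (i + 1) _ _ k h; omega
    · simp [hi] at h

theorem pvFindOp_lt (cs op : List Char) :
    ∀ f i d s k, pvFindOp cs op f i d s = some k → k < cs.length := by
  intro f
  induction f with
  | zero => intro i d s k h; simp [pvFindOp] at h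
  | succ f ih =>
    intro i d s k h
    simp only [pvFindOp] at h
    by_cases hi : i < cs.length
    · simp only [hi, if_true] at h
      split at h
      · cases h; omega
      · exact ih (i + 1) _ _ k h
    · simp [hi] at h

-- aLoop ignores the exact fuel once adequate (needs op ≠ [] so each step advances i)
theorem pvALoop_irrel (cs op : List Char) (hop : op ≠ []) :
    ∀ f1 f2 i d s c p, cs.length - i < f1 → cs.length - i < f2 →
      pvALoop cs op f1 i d s c p = pvALoop cs op f2 i d s c p := by
  have hlen : 0 < op.length := List.length_pos_iff.mpr hop
  intro f1
  induction f1 with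
  | zero => intro f2 i d s c p h1 _; omega
  | succ f1 ih =>
    intro f2 i d s c p h1 h2
    cases f2 with
    | zero => omega
    | succ f2 =>
      simp only [pvALoop]
      by_cases hi : i < cs.length
      · simp only [hi, if_true]
        split
        · exact ih f2 (i + op.length) _ _ _ _ (by omega) (by omega)
        · exact ih f2 (i + 1) _ _ _ _ (by omega) (by omega)
      · simp [hi]

-- drop i = cs[i] :: drop (i+1)
theorem pv_drop_cons (cs : List Char) (i : Nat) (hi : i < cs.length) :
    cs.drop i = cs.getD i ' ' :: cs.drop (i + 1) := by
  rw [List.getD_eq_getElem cs ' ' hi]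
  exact List.drop_eq_getElem_cons hi

-- MAIN per-segment lemma: running A's loop from any state equals "find the next split point,
-- emit the accumulated-plus-sliced segment, restart"
theorem pvALoop_eq_find (cs op : List Char) (hop : op ≠ []) :
    ∀ fuel i d s current parts, cs.length - i < fuel →
      pvALoop cs op fuel i d s current parts =
        match pvFindOp cs op (cs.length + 1) i d s with
        | some k =>
            pvALoop cs op (cs.length + 1) (k + op.length) 0 none []
              (parts ++ [String.ofList (PySem.Chars.strip (current ++ (cs.drop i).take (k - i)))])
        | none =>
            if PySem.Chars.strip (current ++ cs.drop i) ≠ [] then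
              parts ++ [String.ofList (PySem.Chars.strip (current ++ cs.drop i))]
            else parts := by
  have hlen : 0 < op.length := List.length_pos_iff.mpr hop
  intro fuel
  induction fuel with
  | zero => intro i d s current parts h; omega
  | succ fuel ih =>
    intro i d s current parts h
    by_cases hi : i < cs.length
    · have hfind : pvFindOp cs op (cs.length + 1) i d s =
          (if (pvUpdA cs i d s).1 = 0 ∧ (pvUpdA cs i d s).2 = none ∧
              (cs.drop i).take op.length = op
           then some i
           else pvFindOp cs op cs.length (i + 1) (pvUpdA cs i d s).1 (pvUpdA cs i d s).2) := by
        simp only [pvFindOp, hi, if_true]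
      by_cases hm : (pvUpdA cs i d s).1 = 0 ∧ (pvUpdA cs i d s).2 = none ∧
          (cs.drop i).take op.length = op
      · -- split point at i
        rw [hfind, if_pos hm]
        have hstep : pvALoop cs op (fuel + 1) i d s current parts =
            pvALoop cs op fuel (i + op.length) (pvUpdA cs i d s).1 (pvUpdA cs i d s).2 []
              (parts ++ [String.ofList (PySem.Chars.strip current)]) := by
          simp only [pvALoop, hi, if_true]
          rw [if_pos hm]
        rw [hstep, hm.1, hm.2.1]
        simp only [Nat.sub_self, List.take_zero, List.append_nil]
        exact pvALoop_irrel cs op hop fuel (cs.length + 1) (i + op.length) 0 none _ _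
          (by omega) (by omega)
      · -- no split point at i: step one char
        rw [hfind]
        simp only [hm, if_false]
        have hstep : pvALoop cs op (fuel + 1) i d s current parts =
            pvALoop cs op fuel (i + 1) (pvUpdA cs i d s).1 (pvUpdA cs i d s).2
              (current ++ [cs.getD i ' ']) parts := by
          simp only [pvALoop, hi, if_true]
          rw [if_neg hm]
        rw [hstep]
        rw [ih (i + 1) (pvUpdA cs i d s).1 (pvUpdA cs i d s).2 (current ++ [cs.getD i ' ']) parts (by omega)]
        rw [pvFindOp_irrel cs op cs.length (cs.length + 1) (i + 1) _ _ (by omega) (by omega)]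
        cases hk : pvFindOp cs op (cs.length + 1) (i + 1) (pvUpdA cs i d s).1 (pvUpdA cs i d s).2 with
        | some k =>
          have hik : i + 1 ≤ k := pvFindOp_ge cs op _ _ _ _ _ hk
          have hseg : (cs.drop i).take (k - i) =
              cs.getD i ' ' :: (cs.drop (i + 1)).take (k - (i + 1)) := by
            rw [pv_drop_cons cs i hi]
            have : k - i = (k - (i + 1)) + 1 := by omega
            rw [this, List.take_succ_cons]
          simp only [hseg, List.append_assoc, List.cons_append, List.nil_append]
        | none =>
          have htail : cs.drop i = cs.getD i ' ' :: cs.drop (i + 1) := pv_drop_cons cs i hi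
          simp only [htail, List.append_assoc, List.singleton_append]
    · -- i past the end: A finishes, find returns none
      have hdrop : cs.drop i = [] := List.drop_eq_nil_of_le (by omega)
      have hfind : pvFindOp cs op (cs.length + 1) i d s = none := by
        simp [pvFindOp, hi]
      rw [hfind]
      simp only [pvALoop, hi, if_false, hdrop, List.append_nil]

-- outer loops agree
theorem pvALoop_eq_pvBGo (cs op : List Char) (hop : op ≠ []) :
    ∀ fuel j parts, cs.length - j < fuel →
      pvALoop cs op (cs.length + 1) j 0 none [] parts = pvBGo cs op fuel j parts := by
  have hlen : 0 < op.length := List.length_pos_iff.mpr hop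
  intro fuel
  induction fuel with
  | zero => intro j parts h; omega
  | succ fuel ih =>
    intro j parts h
    rw [pvALoop_eq_find cs op hop (cs.length + 1) j 0 none [] parts (by omega)]
    simp only [pvBGo]
    cases hk : pvFindOp cs op (cs.length + 1) j 0 none with
    | some k =>
      have hjk : j ≤ k := pvFindOp_ge cs op _ _ _ _ _ hk
      have hkn : k < cs.length := pvFindOp_lt cs op _ _ _ _ _ hk
      simp only [List.nil_append]
      exact ih (k + op.length) _ (by omega)
    | none => simp

-- ===== VERDICT (by name: the statement is the Claim_ definition above) =====
theorem split_logical_py_spec : Claim_equal_split_logical_py := by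
  intro expr op _ hpre
  unfold Spec_split_logical_py split_logical_py split_logical_py_alt
  have hop : op.toList ≠ [] := fun h => hpre (String.toList_eq_nil_iff.mp h)
  rw [pvALoop_irrel expr.toList op.toList hop (2 * (expr.toList.length + 1))
    (expr.toList.length + 1) 0 0 none [] [] (by omega) (by omega)]
  exact pvALoop_eq_pvBGo expr.toList op.toList hop (2 * (expr.toList.length + 1)) 0 [] (by omega)
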